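-- pv_equiv track=rewrite | github.com/tillig/apm | tests/benchmarks/test_security_and_resolver_benchmarks.py | _generate_dangerous_content
-- ===== SOURCE A (Python) =====
-- def _generate_dangerous_content(size: int) -> str:
--     """Generate content with critical/warning-level dangerous characters.
--
--     Includes tag characters (U+E0001-U+E007F), bidi overrides, and
--     zero-width chars that should be stripped by strip_dangerous().
--     """
--     # Mix of tag characters, bidi overrides, zero-width chars, and ASCII text
--     dangerous_chars = [
--         "\U000e0041",  # tag character 'A' (critical)
--         "\U000e0042",  # tag character 'B' (critical)
--         "\u202a",  # LRE bidi override (critical)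
--         "\u202e",  # RLO bidi override (critical)
--         "\u200b",  # zero-width space (warning)
--         "\u200d",  # zero-width joiner (warning -- not in emoji context)
--         "\u2060",  # word joiner (warning)
--     ]
--     block = "Normal text here. "
--     parts: list[str] = []
--     idx = 0
--     while len("".join(parts)) < size:
--         parts.append(block)
--         parts.append(dangerous_chars[idx % len(dangerous_chars)])
--         idx += 1
--     return "".join(parts)[:size]
-- ===== SOURCE B (Python) =====
-- def _generate_dangerous_content(size: int) -> str:
--     """Generate content with critical/warning-level dangerous characters."""
--     dangerous_chars = [
--         "\U000e0041",
--         "\U000e0042",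
--         "\u202a",
--         "\u202e",
--         "\u200b",
--         "\u200d",
--         "\u2060",
--     ]
--     block = "Normal text here. "
--     if size <= 0:
--         return ""
--     period = "".join(block + dangerous_chars[i] for i in range(len(dangerous_chars)))
--     repeats = -(-size // len(period))
--     return (period * repeats)[:size]
-- ===== Notes on version B (the rewrite author's own statement) =====
-- stated objective: faster
-- what changed: Replaces the append loop that re-joins all accumulated parts on every iteration with building the fixed repeating period string once, repeating it by ceiling division, and taking one slice.
import Mathlib
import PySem

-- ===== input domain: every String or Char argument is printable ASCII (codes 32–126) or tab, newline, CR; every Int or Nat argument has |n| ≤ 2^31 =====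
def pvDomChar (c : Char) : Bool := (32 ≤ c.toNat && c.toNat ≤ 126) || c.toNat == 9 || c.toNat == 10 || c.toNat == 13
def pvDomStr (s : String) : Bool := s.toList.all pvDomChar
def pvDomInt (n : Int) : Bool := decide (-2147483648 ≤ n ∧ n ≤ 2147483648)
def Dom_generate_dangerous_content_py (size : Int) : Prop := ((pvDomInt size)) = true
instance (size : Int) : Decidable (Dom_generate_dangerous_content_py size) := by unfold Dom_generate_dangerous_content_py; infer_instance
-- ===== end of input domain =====

-- B builds the fixed repeating period once and returns a slice of enough repetitions of it: asymptotically faster than A's loop, which re-joins all parts each iteration.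

-- ===== PORT A =====
-- A-side constants (each dangerous char is one code point, given by Char.ofNat)
def pvDangerousA : List (List Char) :=
  [[Char.ofNat 0xE0041], [Char.ofNat 0xE0042], [Char.ofNat 0x202A],
   [Char.ofNat 0x202E], [Char.ofNat 0x200B], [Char.ofNat 0x200D], [Char.ofNat 0x2060]]
def pvBlockA : List Char := "Normal text here. ".toList

-- the while loop: parts is the list of appended pieces, idx the running counter
def pvLoopA (size : Int) (parts : List (List Char)) (idx : Nat) : List (List Char) :=
  if PySem.List.len parts.flatten < size then
    pvLoopA size (parts ++ [pvBlockA, pvDangerousA.getD (idx % 7) []]) (idx + 1)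
  else parts
termination_by (size - PySem.List.len parts.flatten).toNat
decreasing_by
  have h1 : (pvDangerousA.getD (idx % 7) []).length = 1 := by
    have : idx % 7 < 7 := Nat.mod_lt _ (by omega)
    interval_cases idx % 7 <;> rfl
  simp only [PySem.List.len_eq, List.flatten_append, List.length_append,
    List.flatten_cons, List.flatten_nil, List.append_nil] at *
  omega

def generate_dangerous_content_py (size : Int) : String :=
  String.ofList (PySem.List.slice (pvLoopA size [] 0).flatten none (some size))

-- ===== PORT B =====
def pvDangerousB : List (List Char) :=
  [[Char.ofNat 0xE0041], [Char.ofNat 0xE0042], [Char.ofNat 0x202A],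
   [Char.ofNat 0x202E], [Char.ofNat 0x200B], [Char.ofNat 0x200D], [Char.ofNat 0x2060]]
def pvBlockB : List Char := "Normal text here. ".toList

def pvPeriodB : List Char :=
  ((List.range pvDangerousB.length).map (fun i => pvBlockB ++ pvDangerousB.getD i [])).flatten

def generate_dangerous_content_py_alt (size : Int) : String :=
  if size ≤ 0 then ""
  else
    let repeats : Int := -(PySem.Int.floordiv (-size) (PySem.List.len pvPeriodB))
    String.ofList (PySem.List.slice (List.replicate repeats.toNat pvPeriodB).flatten none (some size))

-- ===== PRECONDITION & SPEC =====
def Spec_generate_dangerous_content_py (size : Int) (out : String) : Prop := out = generate_dangerous_content_py_alt size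
instance (size : Int) (out : String) : Decidable (Spec_generate_dangerous_content_py size out) := by unfold Spec_generate_dangerous_content_py; infer_instance

-- ===== CLAIM (what is proved, stated in full; the proofs are below) =====
def Claim_equal_generate_dangerous_content_py : Prop := ∀ (size : Int), Dom_generate_dangerous_content_py size → Spec_generate_dangerous_content_py size (generate_dangerous_content_py size)

-- ===== LEMMAS AND PROOFS =====

-- the periodic stream: unit k is the k-th (block, dangerous char) pair, units idx n the next n of them
def pvUnit (k : Nat) : List Char := pvBlockA ++ pvDangerousA.getD (k % 7) []
def pvUnits (idx : Nat) : Nat → List Char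
  | 0 => []
  | n + 1 => pvUnit idx ++ pvUnits (idx + 1) n

lemma pvUnit_length (k : Nat) : (pvUnit k).length = 19 := by
  have h : k % 7 < 7 := Nat.mod_lt _ (by omega)
  unfold pvUnit
  interval_cases k % 7 <;> rfl

lemma pvUnits_length (idx n : Nat) : (pvUnits idx n).length = 19 * n := by
  induction n generalizing idx with
  | zero => rfl
  | succ n ih => simp [pvUnits, pvUnit_length, ih]; omega

lemma pvUnits_append (idx m n : Nat) :
    pvUnits idx (m + n) = pvUnits idx m ++ pvUnits (idx + m) n := by
  induction m generalizing idx with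
  | zero => simp [pvUnits]
  | succ m ih =>
    have : m + 1 + n = (m + n) + 1 := by omega
    rw [this]
    simp [pvUnits, ih (idx + 1), List.append_assoc]
    ring_nf

lemma pvUnits_shift (idx n : Nat) : pvUnits (idx + 7) n = pvUnits idx n := by
  induction n generalizing idx with
  | zero => rfl
  | succ n ih =>
    simp only [pvUnits]
    have hu : pvUnit (idx + 7) = pvUnit idx := by
      unfold pvUnit; rw [Nat.add_mod_right]
    rw [hu]
    have := ih (idx + 1)
    rw [show idx + 7 + 1 = idx + 1 + 7 by omega, this]

lemma pvPeriodB_eq : pvPeriodB = pvUnits 0 7 := by decide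

lemma pvReplicate_flatten (r : Nat) :
    (List.replicate r pvPeriodB).flatten = pvUnits 0 (7 * r) := by
  induction r with
  | zero => rfl
  | succ r ih =>
    rw [List.replicate_succ, List.flatten_cons, ih, pvPeriodB_eq,
        show 7 * (r + 1) = 7 + 7 * r by ring, pvUnits_append 0 7 (7 * r)]
    congr 1
    exact (pvUnits_shift 0 (7 * r)).symm.trans (by norm_num)

-- the loop extends parts along the periodic stream until the joined length reaches size
lemma pvLoopA_spec (size : Int) (parts : List (List Char)) (idx : Nat) :
    ∃ n, (pvLoopA size parts idx).flatten = parts.flatten ++ pvUnits idx n ∧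
      size ≤ ((pvLoopA size parts idx).flatten.length : Int) := by
  fun_induction pvLoopA size parts idx with
  | case1 parts idx hcond ih =>
    obtain ⟨n, hflat, hlen⟩ := ih
    refine ⟨n + 1, ?_, hlen⟩
    rw [hflat]
    simp [pvUnits, pvUnit, List.append_assoc]
  | case2 parts idx hcond =>
    refine ⟨0, by simp [pvUnits], ?_⟩
    simp only [PySem.List.len_eq, not_lt] at hcond
    exact hcond

lemma pv_take_units (t m M : Nat) (hm : t ≤ 19 * m) (hM : m ≤ M) :
    (pvUnits 0 m).take t = (pvUnits 0 M).take t := by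
  have h := pvUnits_append 0 m (M - m)
  rw [Nat.zero_add, Nat.add_sub_cancel' hM] at h
  rw [h, List.take_append_of_le_length (by rw [pvUnits_length]; omega)]

-- ===== VERDICT (by name: the statement is the Claim_ definition above) =====
set_option maxRecDepth 8192 in
theorem generate_dangerous_content_py_spec : Claim_equal_generate_dangerous_content_py := by
  intro size _
  unfold Spec_generate_dangerous_content_py generate_dangerous_content_py
    generate_dangerous_content_py_alt
  by_cases hs : size ≤ 0
  · rw [pvLoopA]
    rw [if_neg (by simp [PySem.List.len_eq]; omega), if_pos hs]
    simp [PySem.List.slice]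
  · rw [if_neg hs]
    replace hs : 0 < size := by omega
    -- A's side
    obtain ⟨n, hflat, hlen⟩ := pvLoopA_spec size [] 0
    have hflat' : (pvLoopA size [] 0).flatten = pvUnits 0 n := by simpa using hflat
    rw [hflat']
    have hlen' : size ≤ 19 * (n : Int) := by
      rw [hflat', pvUnits_length] at hlen; exact_mod_cast hlen
    -- B's side
    have hplen : PySem.List.len pvPeriodB = 133 := by decide
    rw [hplen]
    have hfd : PySem.Int.floordiv (-size) 133 = (-size) / 133 :=
      PySem.Int.floordiv_eq_ediv_of_pos (by omega)
    set r : Int := -((-size) / 133) with hr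
    have hr0 : 0 ≤ r := by omega
    have hrge : size ≤ 133 * r := by omega
    rw [hfd, ← hr]
    show String.ofList (PySem.List.slice (pvUnits 0 n) none (some size)) =
      String.ofList (PySem.List.slice (List.replicate r.toNat pvPeriodB).flatten none (some size))
    rw [pvReplicate_flatten r.toNat]
    rw [PySem.List.slice_to _ (by omega : (0:Int) ≤ size),
        PySem.List.slice_to _ (by omega : (0:Int) ≤ size)]
    congr 1
    have h7r : size.toNat ≤ 19 * (7 * r.toNat) := by omega
    have hA : size.toNat ≤ 19 * n := by omega
    rw [pv_take_units size.toNat n (n + 7 * r.toNat) hA (by omega),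
        pv_take_units size.toNat (7 * r.toNat) (n + 7 * r.toNat) h7r (by omega)]
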